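-- pv_equiv track=rewrite | github.com/eliasandrin/PyScopone | engine/scoring.py | find_captures
-- ===== SOURCE A (Python) =====
-- def find_captures(card, table_cards):
--     """
--     Find all possible capture combinations for a given card.
--
--     A card can capture:
--     1. A single card with the same value
--     2. A combination of cards that sum to the card's value
--
--     Args:
--         card (tuple): Card to play (value, suit)
--         table_cards (list): Cards currently on the table
--
--     Returns:
--         list: List of possible capture combinations
--     """
--     from itertools import combinations
--
--     card_value = card[0]
--
--     # Check for single card capture
--     single_captures = [c for c in table_cards if c[0] == card_value]
--     if single_captures:
--         return [[single_captures[0]]]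
--
--     # Check for combination captures
--     combination_captures = []
--     for combo_size in range(2, len(table_cards) + 1):
--         for combo in combinations(table_cards, combo_size):
--             if sum(c[0] for c in combo) == card_value:
--                 combination_captures.append(list(combo))
--
--     # Return combinations if found, otherwise return empty combination (card goes to table)
--     return combination_captures if combination_captures else [[]]
-- ===== SOURCE B (Python) =====
-- def find_captures(card, table_cards):
--     """Same result as A: single DFS over all subsets (include-first recursion),
--     filter to valid multi-card captures, then stable-sort by size."""
--     v = card[0]
--     for c in table_cards:
--         if c[0] == v:
--             return [[c]]
--
--     def subsets(cards):
--         if not cards: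
--             return [[]]
--         rest = subsets(cards[1:])
--         return [[cards[0]] + s for s in rest] + rest
--
--     res = [s for s in subsets(table_cards)
--            if len(s) >= 2 and sum(x[0] for x in s) == v]
--     res.sort(key=len)
--     return res if res else [[]]
-- ===== Notes on version B (the rewrite author's own statement) =====
-- stated objective: alternative
-- what changed: A loops over each subset size calling itertools.combinations and tests every combination; B finds the single capture with a first-match scan, enumerates all subsets once with one include-first DFS recursion, filters valid multi-card captures, and stable-sorts them by size to recover A's size-major order.
import Mathlib
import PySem

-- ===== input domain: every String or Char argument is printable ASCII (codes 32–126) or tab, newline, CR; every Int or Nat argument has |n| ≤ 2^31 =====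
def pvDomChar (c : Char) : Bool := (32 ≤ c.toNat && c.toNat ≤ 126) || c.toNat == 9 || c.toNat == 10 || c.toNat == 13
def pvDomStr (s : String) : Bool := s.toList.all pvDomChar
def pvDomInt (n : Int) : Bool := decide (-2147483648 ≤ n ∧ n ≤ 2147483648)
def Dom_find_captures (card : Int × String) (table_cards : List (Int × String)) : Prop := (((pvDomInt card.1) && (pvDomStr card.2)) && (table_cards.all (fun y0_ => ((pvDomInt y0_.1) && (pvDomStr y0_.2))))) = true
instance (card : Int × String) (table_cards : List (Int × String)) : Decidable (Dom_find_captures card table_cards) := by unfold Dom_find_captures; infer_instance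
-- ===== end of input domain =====

-- B replaces A's per-size itertools.combinations loop by a single include-first DFS over all
-- subsets followed by a stable sort by size (objective: alternative; same asymptotic cost).


-- ===== PORT A =====
-- exact port of itertools.combinations(xs, k): k-subsets in lexicographic (index) order
def combosA {α : Type} : Nat → List α → List (List α)
  | 0, _ => [[]]
  | _+1, [] => []
  | k+1, x :: xs => (combosA k xs).map (x :: ·) ++ combosA (k+1) xs

def find_captures (card : Int × String) (table_cards : List (Int × String)) : List (List (Int × String)) :=
  let card_value := card.1
  let single_captures := table_cards.filter (fun c => c.1 == card_value)
  match single_captures with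
  | c :: _ => [[c]]
  | [] =>
    let combination_captures :=
      (PySem.List.pyRange 2 ((table_cards.length : Int) + 1)).foldl
        (fun acc combo_size =>
          acc ++ (combosA combo_size.toNat table_cards).filter
            (fun combo => (combo.map Prod.fst).sum == card_value)) []
    if combination_captures = [] then [[]] else combination_captures

-- ===== PORT B =====
-- include-first DFS over all subsets (Source B's `subsets`)
def subsetsB {α : Type} : List α → List (List α)
  | [] => [[]]
  | x :: xs => ((subsetsB xs).map (x :: ·)) ++ subsetsB xs

def find_captures_alt (card : Int × String) (table_cards : List (Int × String)) : List (List (Int × String)) :=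
  let v := card.1
  match table_cards.find? (fun c => c.1 == v) with
  | some c => [[c]]
  | none =>
    let res := (subsetsB table_cards).filter
      (fun s => decide (2 ≤ s.length) && ((s.map Prod.fst).sum == v))
    let res' := PySem.List.sorted res (fun s => s.length)
    if res' = [] then [[]] else res'

-- ===== PRECONDITION & SPEC =====
def Spec_find_captures (card : Int × String) (table_cards : List (Int × String)) (out : List (List (Int × String))) : Prop := out = find_captures_alt card table_cards
instance (card : Int × String) (table_cards : List (Int × String)) (out : List (List (Int × String))) : Decidable (Spec_find_captures card table_cards out) := by unfold Spec_find_captures; infer_instance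

-- ===== CLAIM (what is proved, stated in full; the proofs are below) =====
def Claim_equal_find_captures : Prop := ∀ (card : Int × String) (table_cards : List (Int × String)), Dom_find_captures card table_cards → Spec_find_captures card table_cards (find_captures card table_cards)

-- ===== LEMMAS AND PROOFS =====

-- first match: find? is the head of filter
theorem pv_find?_eq_head?_filter {α : Type} (p : α → Bool) (xs : List α) :
    xs.find? p = (xs.filter p).head? := (List.head?_filter).symm

-- the length-k slice of the DFS subset list is exactly combinations(xs, k), in order
theorem pv_combosA_zero {α : Type} (xs : List α) : combosA 0 xs = [[]] := by
  cases xs <;> rfl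

theorem pv_filter_len_subsetsB {α : Type} (xs : List α) :
    ∀ (k : Nat), (subsetsB xs).filter (fun s => decide (s.length = k)) = combosA k xs := by
  induction xs with
  | nil =>
    intro k
    cases k <;> simp [subsetsB, combosA]
  | cons x xs ih =>
    intro k
    have hmap : ((subsetsB xs).map (x :: ·)).filter (fun s => decide (s.length = k)) =
        ((subsetsB xs).filter (fun s => decide (s.length + 1 = k))).map (x :: ·) := by
      rw [List.filter_map]
      rfl
    cases k with
    | zero =>
      simp only [subsetsB, List.filter_append, hmap]
      have h1 : (subsetsB xs).filter (fun s => decide (s.length + 1 = 0)) = [] := by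
        apply List.filter_eq_nil_iff.mpr
        intro s _
        simp
      rw [h1, List.map_nil, List.nil_append, ih 0, pv_combosA_zero, pv_combosA_zero]
    | succ k =>
      simp only [subsetsB, List.filter_append, hmap]
      have hps : (fun (s : List α) => decide (s.length + 1 = k + 1)) =
          (fun s => decide (s.length = k)) := by
        funext s; simp
      rw [hps, ih k, ih (k+1)]
      rfl

theorem pv_len_le_of_mem_subsetsB {α : Type} (xs : List α) :
    ∀ s ∈ subsetsB xs, s.length ≤ xs.length := by
  induction xs with
  | nil => intro s hs; simp [subsetsB] at hs; simp [hs]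
  | cons x xs ih =>
    intro s hs
    simp only [subsetsB, List.mem_append, List.mem_map] at hs
    rcases hs with ⟨t, ht, rfl⟩ | hs
    · simpa using ih t ht
    · exact Nat.le_succ_of_le (ih s hs)

-- insertion point of a stable insertion: after every key ≤, before every key >
theorem pv_insertBy_split {α κ : Type} [LinearOrder κ] (key : α → κ) (x : α)
    (C D : List α) (hC : ∀ y ∈ C, ¬ key x < key y) (hD : ∀ y ∈ D, key x < key y) :
    PySem.List.insertBy (fun a b => decide (key a < key b)) x (C ++ D) = C ++ x :: D := by
  induction C with
  | nil =>
    cases D with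
    | nil => rfl
    | cons y D' =>
      have := hD y (by simp)
      simp [PySem.List.insertBy, this]
  | cons c C' ih =>
    have hc : ¬ key x < key c := hC c (by simp)
    simp only [List.cons_append, PySem.List.insertBy, decide_eq_true_eq, if_neg hc]
    rw [ih (fun y hy => hC y (by simp [hy]))]

-- stable sort by length = concatenation of the length-k slices, k ascending
theorem pv_sorted_len_grouped {α : Type} (L : List (List α)) (N : Nat)
    (hN : ∀ s ∈ L, s.length ≤ N) :
    PySem.List.sorted L (fun s => s.length) =
      (List.range (N+1)).flatMap (fun k => L.filter (fun s => decide (s.length = k))) := by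
  rw [PySem.List.sorted_eq_foldl_insertBy]
  induction L using List.reverseRecOn with
  | nil => simp
  | append_singleton L x ih =>
    rw [List.foldl_append, List.foldl_cons, List.foldl_nil,
        ih (fun s hs => hN s (by simp [hs]))]
    set m := x.length with hm
    have hmN : m ≤ N := hN x (by simp)
    -- split range (N+1) = range (m+1) ++ (range (N-m)).map (m+1+·)
    have hsplit : List.range (N+1) = List.range (m+1) ++ (List.range (N-m)).map (m+1+·) := by
      have : N + 1 = (m+1) + (N-m) := by omega
      rw [this, List.range_add]
    rw [hsplit, List.flatMap_append, List.flatMap_append]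
    have hCD := pv_insertBy_split (fun s : List α => s.length) x
      ((List.range (m+1)).flatMap (fun k => L.filter (fun s => decide (s.length = k))))
      (((List.range (N-m)).map (m+1+·)).flatMap (fun k => L.filter (fun s => decide (s.length = k))))
      (by
        intro y hy
        simp only [List.mem_flatMap, List.mem_range, List.mem_filter, decide_eq_true_eq] at hy
        obtain ⟨k, hk, _, hyk⟩ := hy
        show ¬ x.length < y.length
        omega)
      (by
        intro y hy
        simp only [List.mem_flatMap, List.mem_map, List.mem_range, List.mem_filter,
          decide_eq_true_eq] at hy
        obtain ⟨k, ⟨j, hj, rfl⟩, _, hyk⟩ := hy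
        show x.length < y.length
        omega)
    rw [hCD]
    -- left part: range (m+1) = range m ++ [m]; x joins exactly the k = m slice
    have hleft : (List.range (m+1)).flatMap (fun k => (L ++ [x]).filter (fun s => decide (s.length = k))) =
        (List.range (m+1)).flatMap (fun k => L.filter (fun s => decide (s.length = k))) ++ [x] := by
      rw [List.range_succ, List.flatMap_append, List.flatMap_append]
      have h1 : (List.range m).flatMap (fun k => (L ++ [x]).filter (fun s => decide (s.length = k))) =
          (List.range m).flatMap (fun k => L.filter (fun s => decide (s.length = k))) := by
        unfold List.flatMap
        congr 1
        apply List.map_congr_left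
        intro k hk
        simp only [List.mem_range] at hk
        rw [List.filter_append]
        have : [x].filter (fun s => decide (s.length = k)) = [] := by
          simp only [List.filter, ← hm]
          rw [decide_eq_false (by omega)]
        rw [this, List.append_nil]
      have h2 : ([m] : List Nat).flatMap (fun k => (L ++ [x]).filter (fun s => decide (s.length = k))) =
          ([m] : List Nat).flatMap (fun k => L.filter (fun s => decide (s.length = k))) ++ [x] := by
        simp only [List.flatMap_cons, List.flatMap_nil, List.append_nil, List.filter_append]
        congr 1
        simp [← hm]
      rw [h1, h2, List.append_assoc]
    -- right part: x never has length > m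
    have hright : (((List.range (N-m)).map (m+1+·)).flatMap (fun k => (L ++ [x]).filter (fun s => decide (s.length = k)))) =
        ((List.range (N-m)).map (m+1+·)).flatMap (fun k => L.filter (fun s => decide (s.length = k))) := by
      unfold List.flatMap
      congr 1
      apply List.map_congr_left
      intro k hk
      simp only [List.mem_map, List.mem_range] at hk
      obtain ⟨j, hj, rfl⟩ := hk
      rw [List.filter_append]
      have : [x].filter (fun s => decide (s.length = m+1+j)) = [] := by
        simp only [List.filter, ← hm]
        rw [decide_eq_false (by omega)]
      rw [this, List.append_nil]
    rw [hleft, hright, List.append_assoc]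
    simp

-- the two combination accumulators are the same list
theorem pv_combo_lists_eq (v : Int) (tc : List (Int × String)) :
    (PySem.List.pyRange 2 ((tc.length : Int) + 1)).foldl
        (fun acc combo_size =>
          acc ++ (combosA combo_size.toNat tc).filter
            (fun combo => (combo.map Prod.fst).sum == v)) [] =
    PySem.List.sorted
      ((subsetsB tc).filter (fun s => decide (2 ≤ s.length) && ((s.map Prod.fst).sum == v)))
      (fun s => s.length) := by
  set p : List (Int × String) → Bool := fun s => (s.map Prod.fst).sum == v with hp
  -- A side: flatMap over sizes 2 .. n
  rw [PySem.List.foldl_append_eq_flatMap, List.nil_append, PySem.List.pyRange_one]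
  have hA : ((tc.length : Int) + 1 - 2).toNat = tc.length - 1 := by omega
  rw [hA, List.flatMap_map]
  -- B side: group the filtered DFS list by length
  have hlen : ∀ s ∈ (subsetsB tc).filter (fun s => decide (2 ≤ s.length) && p s),
      s.length ≤ tc.length := by
    intro s hs
    exact pv_len_le_of_mem_subsetsB tc s (List.mem_of_mem_filter hs)
  rw [pv_sorted_len_grouped _ tc.length hlen]
  -- each length slice of the filtered list is the sum-filtered combinations list
  have hslice : ∀ k : Nat,
      ((subsetsB tc).filter (fun s => decide (2 ≤ s.length) && p s)).filter
          (fun s => decide (s.length = k)) =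
        (subsetsB tc).filter (fun s => decide (s.length = k) && (decide (2 ≤ s.length) && p s)) := by
    intro k; rw [List.filter_filter]
  by_cases hn1 : tc.length = 0
  · -- empty table: both sides are []
    have htc : tc = [] := List.length_eq_zero_iff.mp hn1
    subst htc
    simp [subsetsB, List.filter]
  · have hsplit : List.range (tc.length + 1) =
        List.range 2 ++ (List.range (tc.length - 1)).map (2+·) := by
      have : tc.length + 1 = 2 + (tc.length - 1) := by omega
      rw [this, List.range_add]
    rw [hsplit, List.flatMap_append, List.flatMap_map]
    have h01 : ∀ k : Nat, k < 2 →
        ((subsetsB tc).filter (fun s => decide (2 ≤ s.length) && p s)).filter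
          (fun s => decide (s.length = k)) = [] := by
      intro k hk
      rw [hslice k]
      apply List.filter_eq_nil_iff.mpr
      intro s _
      by_cases hlk : s.length = k
      · have h2 : decide (2 ≤ s.length) = false := decide_eq_false (by omega)
        simp [h2]
      · simp [hlk]
    have hsmall : (List.range 2).flatMap (fun k =>
        ((subsetsB tc).filter (fun s => decide (2 ≤ s.length) && p s)).filter
          (fun s => decide (s.length = k))) = [] := by
      rw [show List.range 2 = [0, 1] from rfl]
      simp only [List.flatMap_cons, List.flatMap_nil,
        h01 0 (by omega), h01 1 (by omega), List.append_nil]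
    rw [hsmall, List.nil_append]
    unfold List.flatMap
    congr 1
    apply List.map_congr_left
    intro j hj
    have hts : (((2:Int) + (j:Int)).toNat) = j + 2 := by omega
    rw [hts, hslice (2+j)]
    have hpred : (fun (s : List (Int × String)) =>
        decide (s.length = 2+j) && (decide (2 ≤ s.length) && p s)) =
        (fun s => p s && decide (s.length = j+2)) := by
      funext s
      by_cases hl : s.length = j + 2
      · have h2 : 2 ≤ s.length := by omega
        simp [hl, Nat.add_comm 2 j]
      · have h2j : ¬ (s.length = 2 + j) := by omega
        simp [h2j, hl]
    rw [hpred, ← List.filter_filter, pv_filter_len_subsetsB tc (j+2)]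

-- ===== VERDICT (by name: the statement is the Claim_ definition above) =====
theorem find_captures_spec : Claim_equal_find_captures := by
  intro card tc _
  show find_captures card tc = find_captures_alt card tc
  simp only [find_captures, find_captures_alt]
  rw [pv_find?_eq_head?_filter (fun c => c.1 == card.1) tc]
  cases hf : tc.filter (fun c => c.1 == card.1) with
  | cons c rest => simp
  | nil =>
    simp only [List.head?_nil]
    rw [pv_combo_lists_eq card.1 tc]
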